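-- pv_equiv track=rewrite | github.com/gszmigulan/kompilator | kompilator.py | generate_number
-- ===== SOURCE A (Python) =====
-- def generate_number(num, is_neg):
--     message = ""
--     if is_neg == "N":
--         if num < 0:
--             num = -num
--         while num != 0:
--             if num % 2 == 0:
--                 num = num // 2
--                 message = "SHIFT 6 \n" + message
--             else:
--                 num = num - 1
--                 message = "DEC \n" + message
--         message = "SUB 0 \n" + message
--         return message
--     else:
--         while num != 0:
--             if num % 2 == 0:
--                 num = num // 2
--                 message = "SHIFT 6 \n" + message
--             else:
--                 num = num - 1
--                 message = "INC \n" + message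
--         message = "SUB 0 \n" + message
--         return message
-- ===== SOURCE B (Python) =====
-- def generate_number(num, is_neg):
--     if is_neg == "N":
--         n = -num if num < 0 else num
--         inc = "DEC \n"
--     else:
--         n = num
--         inc = "INC \n"
--     if n == 0:
--         return "SUB 0 \n"
--     out = ["SUB 0 \n", inc]
--     for b in bin(n)[3:]:
--         out.append("SHIFT 6 \n")
--         if b == "1":
--             out.append(inc)
--     return "".join(out)
-- ===== Notes on version B (the rewrite author's own statement) =====
-- stated objective: simpler
-- what changed: B replaces A's LSB-first halve/decrement while-loop that quadratically prepends strings with a single MSB-first pass over bin(n)'s digits that appends instruction strings to a list and joins once.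
import Mathlib
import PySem

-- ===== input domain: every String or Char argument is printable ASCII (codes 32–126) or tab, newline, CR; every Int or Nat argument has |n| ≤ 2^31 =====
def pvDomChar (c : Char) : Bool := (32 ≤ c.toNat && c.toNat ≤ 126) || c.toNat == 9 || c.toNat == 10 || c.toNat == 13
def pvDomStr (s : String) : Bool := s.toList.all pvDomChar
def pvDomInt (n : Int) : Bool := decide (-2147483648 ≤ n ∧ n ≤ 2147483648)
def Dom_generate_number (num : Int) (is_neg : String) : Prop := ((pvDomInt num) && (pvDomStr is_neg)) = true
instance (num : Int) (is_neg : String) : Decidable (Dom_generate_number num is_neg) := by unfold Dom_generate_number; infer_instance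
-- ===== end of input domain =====

-- B replaces A's LSB-first halve/decrement loop with quadratic string prepends by a single
-- MSB-first walk over the binary digits that appends instruction strings forward (objective: simpler).

-- ===== PORT A =====
-- A's while-loop, made total with fuel (the callers' fuel suffices on Pre_, proved below);
-- `inc` is the instruction A prepends on an odd num ("DEC \n" in the "N" branch, "INC \n" otherwise).
def pvLoopA (inc : String) : Nat → Int → String → String
  | 0, _, message => message
  | fuel+1, num, message =>
    if num ≠ 0 then
      if PySem.Int.mod num 2 = 0 then
        pvLoopA inc fuel (PySem.Int.floordiv num 2) ("SHIFT 6 \n" ++ message)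
      else
        pvLoopA inc fuel (num - 1) (inc ++ message)
    else message

def generate_number (num : Int) (is_neg : String) : String :=
  if is_neg = "N" then
    let num1 := if num < 0 then -num else num
    "SUB 0 \n" ++ pvLoopA "DEC \n" (num1.toNat + 1) num1 ""
  else
    "SUB 0 \n" ++ pvLoopA "INC \n" (num.toNat + 1) num ""

-- ===== PORT B =====
-- bin(n)[2:] as a list of bits, most significant first
def pvBits : Nat → List Bool
  | 0 => []
  | n+1 => pvBits ((n+1)/2) ++ [decide ((n+1) % 2 = 1)]
decreasing_by exact Nat.div_lt_self (Nat.succ_pos n) (by omega)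

def generate_number_alt (num : Int) (is_neg : String) : String :=
  let p := if is_neg = "N" then ((if num < 0 then -num else num), "DEC \n") else (num, "INC \n")
  if p.1 = 0 then "SUB 0 \n"
  else
    let out := (pvBits p.1.toNat).tail.foldl
      (fun acc b => (acc ++ ["SHIFT 6 \n"]) ++ (if b then [p.2] else [])) ["SUB 0 \n", p.2]
    PySem.Str.join "" out

-- ===== PRECONDITION & SPEC =====
-- Pre_ excludes negative num with is_neg ≠ "N": there A's else-branch while-loop never
-- terminates (Python floor division keeps num negative), so A returns on exactly Pre_.
def Pre_generate_number (num : Int) (is_neg : String) : Prop := is_neg = "N" ∨ 0 ≤ num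
instance (num : Int) (is_neg : String) : Decidable (Pre_generate_number num is_neg) := by
  unfold Pre_generate_number; infer_instance
def pvWitness_generate_number : Int × String := (6, "")

def Spec_generate_number (num : Int) (is_neg : String) (out : String) : Prop := out = generate_number_alt num is_neg
instance (num : Int) (is_neg : String) (out : String) : Decidable (Spec_generate_number num is_neg out) := by unfold Spec_generate_number; infer_instance

-- ===== CLAIM (what is proved, stated in full; the proofs are below) =====
def Claim_equal_generate_number : Prop := ∀ (num : Int) (is_neg : String), Dom_generate_number num is_neg → Pre_generate_number num is_neg → Spec_generate_number num is_neg (generate_number num is_neg)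

-- ===== LEMMAS AND PROOFS =====

-- the string A's loop builds for a nonnegative num, defined by A's own recursion
def pvBlob (inc : String) : Nat → String
  | 0 => ""
  | n+1 =>
    if (n+1) % 2 = 0 then pvBlob inc ((n+1)/2) ++ "SHIFT 6 \n"
    else pvBlob inc n ++ inc
decreasing_by
  · exact Nat.div_lt_self (Nat.succ_pos n) (by omega)
  · omega

-- the string B's foldl appends for a given tail of bits
def pvR (inc : String) : List Bool → String
  | [] => ""
  | b :: bs => ("SHIFT 6 \n" ++ (if b then inc else "")) ++ pvR inc bs

theorem pvLoopA_eq_blob (inc : String) (n : Nat) : ∀ (fuel : Nat) (msg : String),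
    n < fuel → pvLoopA inc fuel (n : Int) msg = pvBlob inc n ++ msg := by
  induction n using Nat.strong_induction_on with
  | _ n ih =>
    intro fuel msg hf
    match fuel with
    | f + 1 =>
      match n with
      | 0 =>
        apply String.toList_inj.mp
        simp [pvLoopA, pvBlob]
      | m + 1 =>
        have hne : ((m + 1 : Nat) : Int) ≠ 0 := by exact_mod_cast Nat.succ_ne_zero m
        have hne' : ((m : Int) + 1) ≠ 0 := by push_cast at hne; exact hne
        by_cases hpar : (m + 1) % 2 = 0
        · have hmod : PySem.Int.mod ((m+1 : Nat) : Int) 2 = (((m+1) % 2 : Nat) : Int) := by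
            exact_mod_cast PySem.Int.mod_natCast (m+1) 2
          have hdiv : PySem.Int.floordiv ((m+1 : Nat) : Int) 2 = (((m+1) / 2 : Nat) : Int) := by
            exact_mod_cast PySem.Int.floordiv_natCast (m+1) 2
          have hrec := ih ((m+1)/2) (Nat.div_lt_self (Nat.succ_pos m) (by omega)) f
            ("SHIFT 6 \n" ++ msg) (by omega)
          simp only [pvLoopA, hmod, hpar]
          simp only [Nat.cast_zero, if_true, hdiv, hrec]
          apply String.toList_inj.mp
          simp [pvBlob, hpar, hne']
        · have hmod : PySem.Int.mod ((m+1 : Nat) : Int) 2 = (((m+1) % 2 : Nat) : Int) := by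
            exact_mod_cast PySem.Int.mod_natCast (m+1) 2
          have h1 : ((m+1 : Nat) : Int) - 1 = ((m : Nat) : Int) := by push_cast; ring
          have hrec := ih m (by omega) f (inc ++ msg) (by omega)
          have hmodne : (((m+1) % 2 : Nat) : Int) ≠ 0 := by
            have : (m+1) % 2 = 1 := by omega
            simp [this]
          simp only [pvLoopA, hmod, hmodne, h1, hrec]
          apply String.toList_inj.mp
          simp [pvBlob, hpar, hne']

theorem pvBits_ne_nil (n : Nat) (h : 0 < n) : pvBits n ≠ [] := by
  match n with
  | m + 1 => simp [pvBits]

theorem pvR_append (inc : String) (t : List Bool) (b : Bool) :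
    pvR inc (t ++ [b]) = pvR inc t ++ ("SHIFT 6 \n" ++ (if b then inc else "")) := by
  induction t with
  | nil =>
    apply String.toList_inj.mp
    simp [pvR]
  | cons a s ih =>
    apply String.toList_inj.mp
    simp [pvR, ih]

theorem pvBlob_eq_R (inc : String) (n : Nat) (h : 0 < n) :
    pvBlob inc n = inc ++ pvR inc (pvBits n).tail := by
  induction n using Nat.strong_induction_on with
  | _ n ih =>
    match n with
    | 1 =>
      apply String.toList_inj.mp
      simp [pvBlob, pvBits, pvR]
    | m + 2 =>
      have hhalf : 0 < (m + 2) / 2 := by omega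
      have htail : (pvBits (m+2)).tail = (pvBits ((m+2)/2)).tail ++ [decide ((m+2) % 2 = 1)] := by
        rw [pvBits]
        exact List.tail_append_of_ne_nil (pvBits_ne_nil _ hhalf)
      by_cases hpar : (m + 2) % 2 = 0
      · have hrec := ih ((m+2)/2) (Nat.div_lt_self (by omega) (by omega)) hhalf
        rw [pvBlob]
        simp only [hpar, if_true, htail, pvR_append, hrec]
        apply String.toList_inj.mp
        simp
      · -- m + 2 odd: pvBlob (m+2) = pvBlob (m+1) ++ inc, and m+1 is even and positive
        have hpar1 : (m + 1) % 2 = 0 := by omega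
        have hd : (m + 1) / 2 = (m + 2) / 2 := by omega
        have hrec := ih ((m+2)/2) (Nat.div_lt_self (by omega) (by omega)) hhalf
        have htail1 : (pvBits (m+1)).tail = (pvBits ((m+2)/2)).tail ++ [decide ((m+1) % 2 = 1)] := by
          rw [pvBits]
          rw [hd]
          exact List.tail_append_of_ne_nil (pvBits_ne_nil _ hhalf)
        have hblob1 : pvBlob inc (m+1) = inc ++ pvR inc (pvBits (m+1)).tail := by
          match m with
          | 0 => omega
          | k + 1 => exact ih (k + 2) (by omega) (by omega)
        rw [pvBlob]
        simp only [hpar, hblob1, htail1, htail, pvR_append, hrec]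
        apply String.toList_inj.mp
        simp [hpar1, (by omega : (m+2) % 2 = 1)]

theorem pvJoin_empty (xs : List String) :
    PySem.Str.join "" xs = String.ofList ((xs.map String.toList).flatten) := by
  have h : ∀ (l : List (List Char)), List.intercalate [] l = l.flatten := by
    intro l
    simp [List.intercalate]
    induction l with
    | nil => rfl
    | cons a t ih => cases t <;> simp_all [List.intersperse]
  simp [PySem.Str.join, PySem.Chars.join, h]

theorem pvJoin_foldl (inc : String) (l : List Bool) : ∀ (init : List String),
    PySem.Str.join "" (l.foldl
      (fun acc b => (acc ++ ["SHIFT 6 \n"]) ++ (if b then [inc] else [])) init)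
    = PySem.Str.join "" init ++ pvR inc l := by
  induction l with
  | nil =>
    intro init
    apply String.toList_inj.mp
    simp [pvR, pvJoin_empty]
  | cons b bs ih =>
    intro init
    simp only [List.foldl_cons, ih]
    apply String.toList_inj.mp
    cases b <;> simp [pvR, pvJoin_empty]

theorem pv_main (num : Int) (hnn : 0 ≤ num) (inc : String) :
    "SUB 0 \n" ++ pvLoopA inc (num.toNat + 1) num "" =
      (if num = 0 then "SUB 0 \n"
       else PySem.Str.join "" ((pvBits num.toNat).tail.foldl
         (fun acc b => (acc ++ ["SHIFT 6 \n"]) ++ (if b then [inc] else [])) ["SUB 0 \n", inc])) := by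
  have hc : ((num.toNat : Nat) : Int) = num := Int.toNat_of_nonneg hnn
  by_cases h0 : num = 0
  · subst h0
    apply String.toList_inj.mp
    simp [pvLoopA]
  · have hpos : 0 < num.toNat := by omega
    rw [if_neg h0, pvJoin_foldl, ← hc]
    simp only [Int.toNat_natCast]
    rw [pvLoopA_eq_blob inc num.toNat (num.toNat + 1) "" (by omega),
      pvBlob_eq_R inc num.toNat hpos]
    apply String.toList_inj.mp
    simp [pvJoin_empty]

-- ===== VERDICT (by name: the statement is the Claim_ definition above) =====
theorem generate_number_spec : Claim_equal_generate_number := by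
  intro num is_neg _ hpre
  unfold Spec_generate_number generate_number generate_number_alt
  by_cases hn : is_neg = "N"
  · simp only [hn, if_pos]
    have h : 0 ≤ (if num < 0 then -num else num) := by split <;> omega
    exact pv_main _ h _
  · have h0 : 0 ≤ num := by
      rcases hpre with h | h
      · exact absurd h hn
      · exact h
    simp only [hn, ite_false]
    exact pv_main num h0 _
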